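-- pv_equiv track=rewrite | github.com/Conn0r121/Pruned_Fractals | Summer_Scholars_2019_Fractals/fractals.py | make_pruned_list
-- ===== SOURCE A (Python) =====
-- import itertools
--
-- def make_tuples(alphabet, L):
--     all_tuples = []
--     for i in range(L):
--         one_size_tuple = list(itertools.product(alphabet, repeat=i+1))
--         for j in range(len(one_size_tuple)):
--             all_tuples.append(one_size_tuple[j])
--     return all_tuples
--
-- def make_pruned_list(alphabet, L, forbidden):
--     all_tuples = make_tuples(alphabet, L)
--     all_tuples_strings = []
--     pruned_tuples_strings = []
--     pruned_tuples_as_lists = []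
--     forbidden_str = str(forbidden)
--     # converts all tuples to strings
--     for i in range(len(all_tuples)):
--         single_tuple_string = ''.join(map(str, all_tuples[i]))
--         all_tuples_strings.append(single_tuple_string)
--
--     # removes all tuples/strings with the forbidden sequence
--     for i in range(len(all_tuples_strings)):
--         if forbidden_str not in all_tuples_strings[i]:
--             pruned_tuples_strings.append(all_tuples_strings[i])
--
--     # converts all strings to tuples
--     for i in range(len(pruned_tuples_strings)):
--         single_tuple_list = list(pruned_tuples_strings[i])
--         pruned_tuples_as_lists.append(single_tuple_list)
--     return pruned_tuples_as_lists
-- ===== SOURCE B (Python) =====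
-- def make_pruned_list(alphabet, L, forbidden):
--     # BFS over tuple-lengths, extending only surviving prefixes:
--     # a string containing `forbidden` stays forbidden under extension,
--     # so pruned branches are never generated.
--     result = []
--     frontier = ['']
--     for _ in range(L):
--         frontier = [t for s in frontier for a in alphabet
--                     for t in [s + a] if forbidden not in t]
--         result += [list(t) for t in frontier]
--     return result
-- ===== Notes on version B (the rewrite author's own statement) =====
-- stated objective: alternative
-- what changed: Instead of materialising every tuple of each length with itertools.product and filtering the joined strings at the end, B grows surviving prefixes level by level, so branches whose prefix already contains the forbidden substring are never generated.
import Mathlib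
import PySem

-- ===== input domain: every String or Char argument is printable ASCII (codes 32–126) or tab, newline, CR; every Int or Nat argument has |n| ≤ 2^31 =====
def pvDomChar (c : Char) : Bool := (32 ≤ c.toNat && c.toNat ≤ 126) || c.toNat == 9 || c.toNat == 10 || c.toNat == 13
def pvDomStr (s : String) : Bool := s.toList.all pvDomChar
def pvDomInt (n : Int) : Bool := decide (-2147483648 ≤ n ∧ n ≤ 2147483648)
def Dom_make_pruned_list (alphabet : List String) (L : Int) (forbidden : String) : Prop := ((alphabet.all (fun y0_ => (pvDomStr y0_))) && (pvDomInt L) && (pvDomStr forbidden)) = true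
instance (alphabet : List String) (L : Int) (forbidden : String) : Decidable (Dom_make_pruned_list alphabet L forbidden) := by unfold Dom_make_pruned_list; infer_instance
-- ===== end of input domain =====

-- B replaces A's generate-everything-then-filter (itertools.product of every length, joined and
-- filtered at the end) with level-by-level extension of only the surviving prefixes, so branches
-- whose prefix already contains the forbidden substring are never generated.

-- ===== PORT A =====

-- Python list(t) for a string t: the list of its characters (as 1-char strings)
def pvChars (s : String) : List String := s.toList.map (fun c => String.ofList [c])

-- itertools.product(alphabet, repeat=n), in CPython's order (leftmost position varies slowest)
def pvProd (alphabet : List String) : Nat → List (List String)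
  | 0 => [[]]
  | n + 1 => alphabet.flatMap (fun a => (pvProd alphabet n).map (fun t => a :: t))

def make_tuples (alphabet : List String) (L : Int) : List (List String) :=
  (PySem.List.pyRange 0 L 1).foldl (fun acc i => acc ++ pvProd alphabet (i + 1).toNat) []

def make_pruned_list (alphabet : List String) (L : Int) (forbidden : String) : List (List String) :=
  let all_tuples := make_tuples alphabet L
  let forbidden_str := forbidden   -- str(forbidden): identity on a string
  let all_tuples_strings :=
    all_tuples.foldl (fun acc t => acc ++ [PySem.Str.join "" t]) []
  let pruned_tuples_strings :=
    all_tuples_strings.foldl (fun acc s => if !PySem.Str.isIn forbidden_str s then acc ++ [s] else acc) []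
  let pruned_tuples_as_lists :=
    pruned_tuples_strings.foldl (fun acc s => acc ++ [pvChars s]) []
  pruned_tuples_as_lists

-- ===== PORT B =====

-- one level: extend every surviving prefix by every letter, keeping survivors
def pruneNext (alphabet : List String) (forbidden : String) (frontier : List String) : List String :=
  frontier.flatMap (fun s => (alphabet.map (fun a => s ++ a)).filter (fun t => !PySem.Str.isIn forbidden t))

-- the `for _ in range(L)` loop, accumulating each level's frontier as char-lists
def pruneGo (alphabet : List String) (forbidden : String) : Nat → List String → List (List String)
  | 0, _ => []
  | n + 1, frontier =>
    let nxt := pruneNext alphabet forbidden frontier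
    nxt.map pvChars ++ pruneGo alphabet forbidden n nxt

def make_pruned_list_alt (alphabet : List String) (L : Int) (forbidden : String) : List (List String) :=
  pruneGo alphabet forbidden L.toNat [""]

-- ===== PRECONDITION & SPEC =====
def Spec_make_pruned_list (alphabet : List String) (L : Int) (forbidden : String) (out : List (List String)) : Prop := out = make_pruned_list_alt alphabet L forbidden
instance (alphabet : List String) (L : Int) (forbidden : String) (out : List (List String)) : Decidable (Spec_make_pruned_list alphabet L forbidden out) := by unfold Spec_make_pruned_list; infer_instance

-- ===== CLAIM (what is proved, stated in full; the proofs are below) =====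
def Claim_equal_make_pruned_list : Prop := ∀ (alphabet : List String) (L : Int) (forbidden : String), Dom_make_pruned_list alphabet L forbidden → Spec_make_pruned_list alphabet L forbidden (make_pruned_list alphabet L forbidden)

-- ===== LEMMAS AND PROOFS =====

-- A's strings of length-k tuples, already filtered: one "level" of the common result
def pvLevel (alphabet : List String) (forbidden : String) (k : Nat) : List String :=
  ((pvProd alphabet k).map (PySem.Str.join "")).filter (fun s => !PySem.Str.isIn forbidden s)

theorem pvJoinNilFlatten (ts : List (List Char)) : PySem.Chars.join [] ts = ts.flatten := by
  induction ts with
  | nil => simp [PySem.Chars.join_nil]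
  | cons p rest ih =>
    cases rest with
    | nil => simp [PySem.Chars.join_singleton]
    | cons q r => simpa [PySem.Chars.join_cons_cons] using ih

theorem pvJoinSnoc (t : List String) (a : String) :
    PySem.Str.join "" (t ++ [a]) = PySem.Str.join "" t ++ a := by
  apply String.toList_inj.mp
  simp [PySem.Str.toList_join, pvJoinNilFlatten, String.toList_append]

theorem pvJoinSingleton (a : String) : PySem.Str.join "" [a] = a := by
  apply String.toList_inj.mp
  simp [PySem.Str.toList_join]

-- containment of the forbidden substring is hereditary under extension on the right
theorem pvIsInAppend (f s a : String) (h : PySem.Str.isIn f s = true) :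
    PySem.Str.isIn f (s ++ a) = true := by
  rw [PySem.Str.isIn_iff_infix] at *
  rw [String.toList_append]
  exact h.trans ((List.prefix_append s.toList a.toList).isInfix)

theorem pvProdSnoc (alphabet : List String) (n : Nat) :
    pvProd alphabet (n + 1) = (pvProd alphabet n).flatMap (fun t => alphabet.map (fun a => t ++ [a])) := by
  induction n with
  | zero => simp [pvProd, ← List.map_eq_flatMap]
  | succ n ih =>
    conv_lhs => rw [show pvProd alphabet (n + 1 + 1) =
      alphabet.flatMap (fun a => (pvProd alphabet (n + 1)).map (fun t => a :: t)) from rfl, ih]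
    conv_rhs => rw [show pvProd alphabet (n + 1) =
      alphabet.flatMap (fun a => (pvProd alphabet n).map (fun t => a :: t)) from rfl]
    simp [List.map_flatMap, List.flatMap_map, List.map_map, Function.comp_def, List.flatMap_assoc]

-- extending only the filtered frontier loses nothing: dropped prefixes only spawn dropped strings
theorem pvStepFilter (alphabet : List String) (forbidden : String) (ss : List String) :
    pruneNext alphabet forbidden (ss.filter (fun s => !PySem.Str.isIn forbidden s)) =
      (ss.flatMap (fun s => alphabet.map (fun a => s ++ a))).filter (fun s => !PySem.Str.isIn forbidden s) := by
  induction ss with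
  | nil => simp [pruneNext]
  | cons s t ih =>
    simp only [List.flatMap_cons, List.filter_append, List.filter_cons]
    by_cases h : PySem.Str.isIn forbidden s = true
    · rw [if_neg (by rw [h]; decide)]
      have hz : (alphabet.map (fun a => s ++ a)).filter (fun s => !PySem.Str.isIn forbidden s) = [] := by
        rw [List.filter_eq_nil_iff]
        intro x hx
        obtain ⟨a, -, rfl⟩ := List.mem_map.mp hx
        simpa using pvIsInAppend forbidden s a h
      rw [hz, List.nil_append]
      exact ih
    · have hb : PySem.Str.isIn forbidden s = false := Bool.eq_false_iff.mpr h
      rw [if_pos (by rw [hb]; decide)]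
      simp only [pruneNext, List.flatMap_cons]
      rw [show (List.filter (fun s => !PySem.Str.isIn forbidden s) t).flatMap
          (fun s => (alphabet.map (fun a => s ++ a)).filter (fun t => !PySem.Str.isIn forbidden t)) =
        List.filter (fun s => !PySem.Str.isIn forbidden s)
          (t.flatMap (fun s => alphabet.map (fun a => s ++ a))) from ih]

theorem pvLevelStep (alphabet : List String) (forbidden : String) (k : Nat) :
    pruneNext alphabet forbidden (pvLevel alphabet forbidden k) = pvLevel alphabet forbidden (k + 1) := by
  unfold pvLevel
  rw [pvStepFilter]
  congr 1
  rw [pvProdSnoc, List.map_flatMap, List.flatMap_map]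
  congr 1
  funext t
  simp [List.map_map, Function.comp_def, pvJoinSnoc]

theorem pvBase (alphabet : List String) (forbidden : String) :
    pruneNext alphabet forbidden [""] = pvLevel alphabet forbidden 1 := by
  unfold pruneNext pvLevel
  have hmap : ((alphabet.flatMap (fun a => [[a]])).map (PySem.Str.join "")) = alphabet := by
    rw [← List.map_eq_flatMap, List.map_map]
    simpa [Function.comp_def, pvJoinSingleton] using List.map_id alphabet
  simp [pvProd, hmap]

theorem pvGoSpec (alphabet : List String) (forbidden : String) (n : Nat) :
    ∀ k, pruneGo alphabet forbidden n (pvLevel alphabet forbidden k) =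
      (List.range n).flatMap (fun i => (pvLevel alphabet forbidden (k + 1 + i)).map pvChars) := by
  induction n with
  | zero => intro k; simp [pruneGo]
  | succ n ih =>
    intro k
    simp only [pruneGo, pvLevelStep, ih (k + 1)]
    rw [List.range_succ_eq_map]
    simp only [List.flatMap_cons, List.flatMap_map, Nat.add_zero,
      show ∀ i : Nat, k + 1 + 1 + i = k + 1 + (i + 1) from fun i => by omega]

-- A's end-to-end result as filter-of-map over the concatenated products
theorem pvAChar (alphabet : List String) (L : Int) (forbidden : String) :
    make_pruned_list alphabet L forbidden =
      (((PySem.List.pyRange 0 L 1).flatMap (fun i => pvProd alphabet (i + 1).toNat)).map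
          (PySem.Str.join "") |>.filter (fun s => !PySem.Str.isIn forbidden s)).map pvChars := by
  unfold make_pruned_list make_tuples
  dsimp only
  simp only [PySem.List.foldl_append_eq_flatMap,
    PySem.List.foldl_append_if_eq_filter, List.nil_append, ← List.map_eq_flatMap]

theorem pvRangeNil (L : Int) (h : L ≤ 0) : PySem.List.pyRange 0 L 1 = [] := by
  simp [PySem.List.pyRange]
  omega

-- ===== VERDICT (by name: the statement is the Claim_ definition above) =====
theorem make_pruned_list_spec : Claim_equal_make_pruned_list := by
  intro alphabet L forbidden _
  unfold Spec_make_pruned_list make_pruned_list_alt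
  rw [pvAChar]
  rcases hn : L.toNat with _ | m
  · rw [pvRangeNil L (by omega)]
    simp [pruneGo]
  · have hL : L = ((m + 1 : Nat) : Int) := by omega
    rw [hL, PySem.List.pyRange_zero_natCast, List.flatMap_map]
    simp only [show ∀ j : Nat, (((j : Nat) : Int) + 1).toNat = j + 1 from fun j => by omega]
    rw [List.map_flatMap, List.filter_flatMap, List.map_flatMap]
    rw [List.range_succ_eq_map]
    simp only [List.flatMap_cons, List.flatMap_map, Nat.zero_add]
    show _ = pruneGo alphabet forbidden (m + 1) [""]
    simp only [pruneGo, pvBase, pvGoSpec]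
    congr 1
    simp only [pvLevel, show ∀ i : Nat, 2 + i = i + 1 + 1 from fun i => by omega]
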